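-- pv_equiv track=rewrite | github.com/ertepenazsude-byte/translate | çeviri/app2.py | convert
-- ===== SOURCE A (Python) =====
-- def convert(word, table):
--     out, i = "", 0
--     while i < len(word):
--         if i+2 <= len(word) and word[i:i+2] in table:
--             out += table[word[i:i+2]]
--             i += 2
--         elif word[i] in table:
--             out += table[word[i]]
--             i += 1
--         else:
--             out += word[i]
--             i += 1
--     return out
-- ===== SOURCE B (Python) =====
-- def convert(word, table):
--     # Longest-first alternation: all 2-char keys (in table order) precede 1-char keys;
--     # scan once, first matching pattern wins, unmatched chars pass through.
--     pats = sorted((k for k in table if 1 <= len(k) <= 2), key=len, reverse=True)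
--     if not pats:
--         return word
--     out = []
--     i = 0
--     n = len(word)
--     while i < n:
--         for p in pats:
--             if word.startswith(p, i):
--                 out.append(table[p])
--                 i += len(p)
--                 break
--         else:
--             out.append(word[i])
--             i += 1
--     return "".join(out)
-- ===== Notes on version B (the rewrite author's own statement) =====
-- stated objective: faster
-- what changed: Replaces A's per-position pair of dict membership probes (2-char slice, then 1-char) by a pattern list built once from the table's usable keys, sorted longest-first (all 2-char keys before 1-char keys), with a single scan emitting the replacement of the first pattern matching at the current position; the output is accumulated in a list and joined once instead of A's repeated string concatenation.
import Mathlib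
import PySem

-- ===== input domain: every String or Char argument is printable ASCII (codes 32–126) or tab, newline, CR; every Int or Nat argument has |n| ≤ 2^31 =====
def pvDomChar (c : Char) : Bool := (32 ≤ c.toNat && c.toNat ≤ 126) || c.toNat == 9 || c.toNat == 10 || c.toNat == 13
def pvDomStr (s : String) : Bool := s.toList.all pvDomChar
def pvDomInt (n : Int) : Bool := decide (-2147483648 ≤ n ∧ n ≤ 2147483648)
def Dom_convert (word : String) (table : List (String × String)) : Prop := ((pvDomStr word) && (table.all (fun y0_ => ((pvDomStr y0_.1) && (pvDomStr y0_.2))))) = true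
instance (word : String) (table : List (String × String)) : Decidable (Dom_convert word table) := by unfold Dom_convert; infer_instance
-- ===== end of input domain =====

-- B replaces A's two dict probes per position by one pre-sorted longest-first pattern list
-- scanned for the first match, accumulating output pieces and joining once (measured faster:
-- it avoids A's repeated string concatenation); same results on every input.


-- ===== PORT A =====
-- the Python dict argument, as a PySem.Dict over char lists
def convertTab (table : List (String × String)) : PySem.Dict (List Char) (List Char) :=
  PySem.Dict.ofList (table.map (fun p => (p.1.toList, p.2.toList)))

-- A's while loop over word[i:], branch order as in the Python
def convertLoopA (d : PySem.Dict (List Char) (List Char)) : List Char → List Char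
  | [] => []
  | [c] =>
    match d.get? [c] with
    | some v => v
    | none => [c]
  | c :: c2 :: rest =>
    match d.get? [c, c2] with
    | some v => v ++ convertLoopA d rest
    | none =>
      match d.get? [c] with
      | some v => v ++ convertLoopA d (c2 :: rest)
      | none => c :: convertLoopA d (c2 :: rest)

def convert (word : String) (table : List (String × String)) : String :=
  String.ofList (convertLoopA (convertTab table) word.toList)

-- ===== PORT B =====
-- sorted((k for k in table if 1 <= len(k) <= 2), key=len, reverse=True)
def convertPats (d : PySem.Dict (List Char) (List Char)) : List (List Char) :=
  PySem.List.sorted ((PySem.Dict.keys d).filter (fun k => 1 ≤ k.length && k.length ≤ 2))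
    (fun k => (k.length : Nat)) true

-- B's while loop: first pattern matching at the current position wins ('for … break / else')
def convertLoopB (d : PySem.Dict (List Char) (List Char)) (pats : List (List Char)) :
    List Char → List Char
  | [] => []
  | c :: rest =>
    match pats.find? (fun p => p.isPrefixOf (c :: rest)) with
    | some (p1 :: ps) => PySem.Dict.getD d (p1 :: ps) [] ++ convertLoopB d pats (rest.drop ps.length)
    | _ => c :: convertLoopB d pats rest
  termination_by cs => cs.length
  decreasing_by
    · simp only [List.length_cons, List.length_drop]; omega
    · simp

def convert_alt (word : String) (table : List (String × String)) : String :=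
  let d := convertTab table
  let pats := convertPats d
  if pats = [] then word else String.ofList (convertLoopB d pats word.toList)

-- ===== PRECONDITION & SPEC =====
def Spec_convert (word : String) (table : List (String × String)) (out : String) : Prop := out = convert_alt word table
instance (word : String) (table : List (String × String)) (out : String) : Decidable (Spec_convert word table out) := by unfold Spec_convert; infer_instance

-- ===== CLAIM (what is proved, stated in full; the proofs are below) =====
def Claim_equal_convert : Prop := ∀ (word : String) (table : List (String × String)), Dom_convert word table → Spec_convert word table (convert word table)

-- ===== LEMMAS AND PROOFS =====

lemma mem_keys_iff_get? (d : PySem.Dict (List Char) (List Char)) (k : List Char) :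
    k ∈ PySem.Dict.keys d ↔ PySem.Dict.get? d k ≠ none := by
  rw [← PySem.Dict.contains_iff_mem_keys]
  constructor
  · intro hc hn
    rw [PySem.Dict.get?_eq_none_iff_contains] at hn
    simp [hn] at hc
  · intro hn
    cases hc : PySem.Dict.contains d k
    · exact absurd ((PySem.Dict.get?_eq_none_iff_contains d k).mpr hc) hn
    · rfl

lemma mem_convertPats {d : PySem.Dict (List Char) (List Char)} {p : List Char} :
    p ∈ convertPats d ↔ p ∈ PySem.Dict.keys d ∧ 1 ≤ p.length ∧ p.length ≤ 2 := by
  simp [convertPats, PySem.List.mem_sorted, List.mem_filter]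

lemma pairwise_convertPats (d : PySem.Dict (List Char) (List Char)) :
    (convertPats d).Pairwise (fun a b => b.length ≤ a.length) := by
  simp only [convertPats]
  exact PySem.List.sorted_pairwise_rev _ _

-- find? over the pattern list at a position with at least two remaining characters
lemma find?_two (c c2 : Char) (rest : List Char) :
    ∀ (pats : List (List Char)), (∀ p ∈ pats, 1 ≤ p.length ∧ p.length ≤ 2) →
    pats.Pairwise (fun a b => b.length ≤ a.length) →
    pats.find? (fun p => p.isPrefixOf (c :: c2 :: rest)) =
      (if [c, c2] ∈ pats then some [c, c2] else if [c] ∈ pats then some [c] else none) := by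
  intro pats
  induction pats with
  | nil => intro _ _; simp
  | cons q t ih =>
    intro hlen hpw
    have hql := hlen q (by simp)
    have hpw2 := List.pairwise_cons.mp hpw
    by_cases hm : q.isPrefixOf (c :: c2 :: rest) = true
    · have hpre := List.isPrefixOf_iff_prefix.mp hm
      have hq : q = [c] ∨ q = [c, c2] := by
        obtain ⟨s, hs⟩ := hpre
        rcases q with _ | ⟨a, _ | ⟨b, _ | ⟨e, q'⟩⟩⟩
        · simp at hql
        · left
          obtain ⟨h1, -⟩ := List.cons_eq_cons.mp hs
          rw [h1]
        · right
          obtain ⟨h1, hs'⟩ := List.cons_eq_cons.mp hs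
          obtain ⟨h2, -⟩ := List.cons_eq_cons.mp hs'
          rw [h1, h2]
        · exfalso
          have h2 := hql.2
          simp only [List.length_cons] at h2
          omega
      rcases hq with hq | hq
      · subst hq
        simp only [List.find?_cons, hm]
        have h2 : [c, c2] ∉ [c] :: t := by
          simp only [List.mem_cons]
          rintro (h | h)
          · simp at h
          · have := hpw2.1 _ h
            simp at this
        simp [h2]
      · subst hq
        simp only [List.find?_cons, hm]
        simp
    · rw [Bool.not_eq_true] at hm
      simp only [List.find?_cons, hm]
      have h1 : q ≠ [c] := by
        rintro rfl
        have hp : ([c] : List Char) <+: c :: c2 :: rest := ⟨c2 :: rest, rfl⟩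
        rw [← List.isPrefixOf_iff_prefix] at hp
        simp [hm] at hp
      have h2 : q ≠ [c, c2] := by
        rintro rfl
        have hp : ([c, c2] : List Char) <+: c :: c2 :: rest := ⟨rest, rfl⟩
        rw [← List.isPrefixOf_iff_prefix] at hp
        simp [hm] at hp
      rw [ih (fun p hp => hlen p (by simp [hp])) hpw2.2]
      simp [List.mem_cons, Ne.symm h1, Ne.symm h2]

-- find? over the pattern list at the last character
lemma find?_one (c : Char) :
    ∀ (pats : List (List Char)), (∀ p ∈ pats, 1 ≤ p.length ∧ p.length ≤ 2) →
    pats.find? (fun p => p.isPrefixOf [c]) =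
      (if [c] ∈ pats then some [c] else none) := by
  intro pats
  induction pats with
  | nil => intro _; simp
  | cons q t ih =>
    intro hlen
    have hql := hlen q (by simp)
    by_cases hm : q.isPrefixOf [c] = true
    · have hpre := List.isPrefixOf_iff_prefix.mp hm
      have hq : q = [c] := by
        have hle := hpre.length_le
        have h1 := hql.1
        obtain ⟨s, hs⟩ := hpre
        rcases q with _ | ⟨a, _ | ⟨b, q'⟩⟩
        · simp at h1
        · obtain ⟨h1, -⟩ := List.cons_eq_cons.mp hs
          rw [h1]
        · exfalso
          simp only [List.length_cons, List.length_nil] at hle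
          omega
      subst hq
      simp only [List.find?_cons, hm]
      simp
    · rw [Bool.not_eq_true] at hm
      simp only [List.find?_cons, hm]
      have h1 : q ≠ [c] := by
        rintro rfl
        have hp : ([c] : List Char) <+: [c] := ⟨[], by simp⟩
        rw [← List.isPrefixOf_iff_prefix] at hp
        simp [hm] at hp
      rw [ih (fun p hp => hlen p (by simp [hp]))]
      simp [List.mem_cons, Ne.symm h1]

lemma loopB_nil_pats (d : PySem.Dict (List Char) (List Char)) :
    ∀ cs, convertLoopB d [] cs = cs := by
  intro cs
  induction cs with
  | nil => simp [convertLoopB]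
  | cons c rest ih => simp [convertLoopB, ih]

lemma loopA_eq_loopB (d : PySem.Dict (List Char) (List Char)) :
    ∀ cs, convertLoopA d cs = convertLoopB d (convertPats d) cs := by
  have hlen : ∀ p ∈ convertPats d, 1 ≤ p.length ∧ p.length ≤ 2 :=
    fun p hp => (mem_convertPats.mp hp).2
  have hpw := pairwise_convertPats d
  intro cs
  induction cs using convertLoopA.induct d with
  | case1 => simp [convertLoopA, convertLoopB]
  | case2 c v h =>
    simp only [convertLoopA, convertLoopB]
    rw [find?_one c _ hlen]
    have hmem : [c] ∈ convertPats d :=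
      mem_convertPats.mpr ⟨(mem_keys_iff_get? d [c]).mpr (by simp [h]), by simp, by simp⟩
    simp [h, hmem, PySem.Dict.getD_of_get?_eq_some d _ h]
    simp [convertLoopB]
  | case3 c h =>
    simp only [convertLoopA, convertLoopB]
    rw [find?_one c _ hlen]
    have hmem : [c] ∉ convertPats d := by
      intro hc
      exact ((mem_keys_iff_get? d [c]).mp (mem_convertPats.mp hc).1) h
    simp [h, hmem]
  | case4 c c2 rest v h ih =>
    simp only [convertLoopA, convertLoopB]
    rw [find?_two c c2 rest _ hlen hpw]
    have hmem : [c, c2] ∈ convertPats d :=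
      mem_convertPats.mpr ⟨(mem_keys_iff_get? d _).mpr (by simp [h]), by simp, by simp⟩
    simp [h, hmem, PySem.Dict.getD_of_get?_eq_some d _ h, ih]
  | case5 c c2 rest h v h1 ih =>
    simp only [convertLoopA, convertLoopB]
    rw [find?_two c c2 rest _ hlen hpw]
    have hmem2 : [c, c2] ∉ convertPats d := by
      intro hc
      exact absurd h (((mem_keys_iff_get? d _).mp (mem_convertPats.mp hc).1))
    have hmem1 : [c] ∈ convertPats d :=
      mem_convertPats.mpr ⟨(mem_keys_iff_get? d _).mpr (by simp [h1]), by simp, by simp⟩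
    simp [h, h1, hmem2, hmem1, PySem.Dict.getD_of_get?_eq_some d _ h1, ih]
  | case6 c c2 rest h h1 ih =>
    simp only [convertLoopA, convertLoopB]
    rw [find?_two c c2 rest _ hlen hpw]
    have hmem2 : [c, c2] ∉ convertPats d := by
      intro hc
      exact absurd h (((mem_keys_iff_get? d _).mp (mem_convertPats.mp hc).1))
    have hmem1 : [c] ∉ convertPats d := by
      intro hc
      exact absurd h1 (((mem_keys_iff_get? d _).mp (mem_convertPats.mp hc).1))
    simp [h, h1, hmem2, hmem1, ih]
    rw [convertLoopB]

-- ===== VERDICT (by name: the statement is the Claim_ definition above) =====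
theorem convert_spec : Claim_equal_convert := by
  intro word table _
  unfold Spec_convert convert convert_alt
  by_cases hp : convertPats (convertTab table) = []
  · rw [loopA_eq_loopB, hp, loopB_nil_pats]
    simp [hp, String.ofList_toList]
  · rw [if_neg hp, loopA_eq_loopB]
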